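-- pv_equiv track=rewrite | github.com/prvnlhr/PYTHON_DSA | Data Structure/Searching and Sorting/13. Concert Tickets.py | concertTicketsBeetr
-- ===== SOURCE A (Python) =====
-- import bisect
--
-- def concertTicketsBeetr(price, pay):
--     maxPrice = sorted(price)
--     res = [0] * len(pay)
--
--     for i, ele in enumerate(pay):
--         pos_of_ele = bisect.bisect(maxPrice, ele)
--
--         if pos_of_ele == 0:
--             res[i] = -1
--         else:
--             # since bisect gives pos of ele in array not index, so we need to do (pos-1) to get index
--             pos_of_ele -= 1
--             res[i] = maxPrice[pos_of_ele]
--             maxPrice.remove(res[i])  # remove used value from arr, to avoid taking it next time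
--     return res
-- ===== SOURCE B (Python) =====
-- def concertTicketsBeetr(price, pay):
--     # No sorting: keep the remaining tickets as an unordered list and, for each
--     # customer, take the maximum of the affordable prices (or -1 if none).
--     avail = list(price)
--     res = []
--     for x in pay:
--         affordable = [p for p in avail if p <= x]
--         if not affordable:
--             res.append(-1)
--         else:
--             v = max(affordable)
--             res.append(v)
--             avail.remove(v)
--     return res
-- ===== Notes on version B (the rewrite author's own statement) =====
-- stated objective: simpler
-- what changed: B drops the sort and the binary search entirely: it keeps the remaining tickets as an unordered list and, per customer, takes max() of a filter of the affordable prices and removes that one value, appending to the output instead of writing into a preallocated index array.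
import Mathlib
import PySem

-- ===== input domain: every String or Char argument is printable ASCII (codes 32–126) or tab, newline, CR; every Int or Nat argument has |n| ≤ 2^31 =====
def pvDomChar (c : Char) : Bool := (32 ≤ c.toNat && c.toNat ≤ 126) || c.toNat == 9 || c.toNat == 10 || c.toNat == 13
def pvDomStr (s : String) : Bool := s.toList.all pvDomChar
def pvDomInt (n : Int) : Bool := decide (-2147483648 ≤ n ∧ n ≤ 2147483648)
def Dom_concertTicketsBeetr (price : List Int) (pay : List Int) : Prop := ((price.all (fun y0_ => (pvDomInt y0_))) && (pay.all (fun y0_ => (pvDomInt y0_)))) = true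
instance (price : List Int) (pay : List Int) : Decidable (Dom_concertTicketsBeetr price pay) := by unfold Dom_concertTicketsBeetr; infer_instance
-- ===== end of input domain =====

-- B is a sort-free re-implementation (per customer: max of the affordable prices,
-- remove that ticket); same values as A on every input, objective: simpler.

-- ===== PORT A =====
-- one iteration of A's for-loop; state = (res, maxPrice).
-- res[i] = v is `List.set i.toNat v`: enumerate indices are 0 ≤ i < len(res), so this is exact;
-- maxPrice[pos-1] is `getD (pos-1) 0`: bisect guarantees pos-1 < len(maxPrice), so the default never fires;
-- maxPrice.remove(v) is `(remove? …).getD …`: v was just read from maxPrice, so ValueError never occurs.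
def aStep (st : List Int × List Int) (p : Int × Int) : List Int × List Int :=
  let pos := PySem.List.bisectRight st.2 p.2
  if pos = 0 then (st.1.set p.1.toNat (-1), st.2)
  else
    let v := st.2.getD (pos - 1) 0
    (st.1.set p.1.toNat v, (PySem.List.remove? st.2 v).getD st.2)

def concertTicketsBeetr (price : List Int) (pay : List Int) : List Int :=
  let maxPrice := PySem.List.sorted price (fun x => x) false
  let res := List.replicate pay.length (0 : Int)
  ((PySem.List.enumerate pay 0).foldl aStep (res, maxPrice)).1

-- ===== PORT B =====
-- Source B's loop over pay as structural recursion; state = remaining avail list.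
-- avail.remove(v) is `(remove? …).getD …`: v = max(affordable) ∈ avail, so ValueError never occurs.
def altGo (avail : List Int) (pay : List Int) : List Int :=
  match pay with
  | [] => []
  | x :: xs =>
    let affordable := avail.filter (fun p => decide (p ≤ x))
    match PySem.List.max? affordable (fun y => y) with
    | none => -1 :: altGo avail xs
    | some v => v :: altGo ((PySem.List.remove? avail v).getD avail) xs

def concertTicketsBeetr_alt (price : List Int) (pay : List Int) : List Int :=
  altGo price pay

-- ===== PRECONDITION & SPEC =====
def Spec_concertTicketsBeetr (price : List Int) (pay : List Int) (out : List Int) : Prop := out = concertTicketsBeetr_alt price pay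
instance (price : List Int) (pay : List Int) (out : List Int) : Decidable (Spec_concertTicketsBeetr price pay out) := by unfold Spec_concertTicketsBeetr; infer_instance

-- ===== CLAIM (what is proved, stated in full; the proofs are below) =====
def Claim_equal_concertTicketsBeetr : Prop := ∀ (price : List Int) (pay : List Int), Dom_concertTicketsBeetr price pay → Spec_concertTicketsBeetr price pay (concertTicketsBeetr price pay)

-- ===== LEMMAS AND PROOFS =====

-- A's per-element result, abstracted away from the res-array bookkeeping.
def gA (mp : List Int) (pay : List Int) : List Int :=
  match pay with
  | [] => []
  | x :: xs =>
    let pos := PySem.List.bisectRight mp x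
    if pos = 0 then -1 :: gA mp xs
    else
      let v := mp.getD (pos - 1) 0
      v :: gA ((PySem.List.remove? mp v).getD mp) xs

-- A's fold writes gA's values into slots k, k+1, … of res.
theorem foldA_eq (pay : List Int) : ∀ (k : Nat) (res mp : List Int),
    res.length = k + pay.length →
    ((PySem.List.enumerate pay (k : Int)).foldl aStep (res, mp)).1
      = res.take k ++ gA mp pay := by
  induction pay with
  | nil =>
      intro k res mp hlen
      simp only [List.length_nil, Nat.add_zero] at hlen
      simp [PySem.List.enumerate_nil, gA, List.take_of_length_le hlen.le]
  | cons x xs ih =>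
      intro k res mp hlen
      have hk : k < res.length := by simp only [List.length_cons] at hlen; omega
      rw [PySem.List.enumerate_cons]
      have hstep : ∀ (w : Int) (mp' : List Int),
          aStep (res, mp) ((k : Int), x) = (res.set k w, mp') →
          ((PySem.List.enumerate xs ((k : Int) + 1)).foldl aStep (aStep (res, mp) ((k : Int), x))).1
            = res.take k ++ w :: gA mp' xs := by
        intro w mp' heq
        have : ((k : Int) + 1) = ((k + 1 : Nat) : Int) := by push_cast; ring
        rw [heq, this, ih (k + 1) (res.set k w) mp' (by simp only [List.length_set, hlen, List.length_cons]; omega)]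
        have htake : (res.set k w).take (k + 1) = res.take k ++ [w] := by
          rw [List.take_add_one]
          simp [List.take_set_of_le (le_refl k), hk]
        simp [htake]
      simp only [List.foldl_cons]
      by_cases h0 : PySem.List.bisectRight mp x = 0
      · rw [hstep (-1) mp (by simp [aStep, h0])]
        simp [gA, h0]
      · rw [hstep (mp.getD (PySem.List.bisectRight mp x - 1) 0)
              ((PySem.List.remove? mp (mp.getD (PySem.List.bisectRight mp x - 1) 0)).getD mp)
              (by simp [aStep, h0])]
        simp [gA, h0]

-- the key step facts, on a sorted multiset mp permuted as avail
theorem gA_eq_altGo (pay : List Int) : ∀ (mp avail : List Int),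
    mp.Perm avail → mp.Pairwise (· ≤ ·) → gA mp pay = altGo avail pay := by
  induction pay with
  | nil => intro mp avail _ _; simp [gA, altGo]
  | cons x xs ih =>
      intro mp avail hperm hsorted
      have hmem : ∀ y, y ∈ mp ↔ y ∈ avail := fun y => hperm.mem_iff
      have hspec := PySem.List.bisectRight_spec mp x hsorted
      set pos := PySem.List.bisectRight mp x with hpos
      by_cases h0 : pos = 0
      · -- nothing affordable
        have hfilt : avail.filter (fun p => decide (p ≤ x)) = [] := by
          rw [List.filter_eq_nil_iff]
          intro y hy
          rcases List.mem_iff_getElem.1 ((hmem y).2 hy) with ⟨j, hj, rfl⟩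
          have := hspec.2.2 j hj (by omega)
          simp; omega
        rw [gA, altGo]
        simp only [hfilt, ← hpos, h0, if_true]
        simp [PySem.List.max?, ih mp avail hperm hsorted]
      · -- v = mp[pos-1] is the greatest affordable price
        have hposle : pos ≤ mp.length := hspec.1
        have hplt : pos - 1 < mp.length := by omega
        have hv : mp.getD (pos - 1) 0 = mp[pos - 1] := List.getD_eq_getElem mp 0 hplt
        set v := mp.getD (pos - 1) 0 with hvdef
        have hvmem : v ∈ mp := by rw [hv]; exact List.getElem_mem hplt
        have hvle : v ≤ x := by rw [hv]; exact hspec.2.1 (pos - 1) hplt (by omega)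
        have hmax : ∀ y ∈ avail, y ≤ x → y ≤ v := by
          intro y hy hyx
          rcases List.mem_iff_getElem.1 ((hmem y).2 hy) with ⟨j, hj, rfl⟩
          by_cases hjp : j < pos
          · rcases Nat.lt_or_ge j (pos - 1) with hlt | hge
            · rw [hv]
              exact List.pairwise_iff_getElem.1 hsorted j (pos - 1) hj hplt hlt
            · have : j = pos - 1 := by omega
              subst this; rw [hv]
          · exact absurd (hspec.2.2 j hj (by omega)) (by omega)
        have hvfilt : v ∈ avail.filter (fun p => decide (p ≤ x)) := by
          rw [List.mem_filter]; exact ⟨(hmem v).1 hvmem, by simpa using hvle⟩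
        obtain ⟨m, hm⟩ : ∃ m, PySem.List.max? (avail.filter (fun p => decide (p ≤ x))) (fun y => y) = some m := by
          cases hc : PySem.List.max? (avail.filter (fun p => decide (p ≤ x))) (fun y => y) with
          | none =>
              rw [PySem.List.max?_eq_none_iff] at hc
              rw [hc] at hvfilt; cases hvfilt
          | some m => exact ⟨m, rfl⟩
        have hmmem := PySem.List.max?_mem hm
        have hmv : m = v := by
          have h1 : m ≤ v := by
            rcases List.mem_filter.1 hmmem with ⟨hma, hmx⟩
            exact hmax m hma (by simpa using hmx)
          have h2 : v ≤ m := PySem.List.max?_isMax hm v hvfilt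
          omega
        have hrm : (PySem.List.remove? mp v).getD mp = mp.erase v := by
          rw [PySem.List.remove?_eq_some_erase mp v hvmem]; rfl
        have hrma : (PySem.List.remove? avail v).getD avail = avail.erase v := by
          rw [PySem.List.remove?_eq_some_erase avail v ((hmem v).1 hvmem)]; rfl
        rw [gA, altGo]
        simp only [← hpos, ← hvdef, if_neg h0, hm, hmv, hrm, hrma]
        congr 1
        exact ih (mp.erase v) (avail.erase v) (hperm.erase v)
          (hsorted.sublist (List.erase_sublist))

-- ===== VERDICT (by name: the statement is the Claim_ definition above) =====
theorem concertTicketsBeetr_spec : Claim_equal_concertTicketsBeetr := by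
  intro price pay _
  unfold Spec_concertTicketsBeetr concertTicketsBeetr concertTicketsBeetr_alt
  have h := foldA_eq pay 0 (List.replicate pay.length (0 : Int))
      (PySem.List.sorted price (fun x => x) false) (by simp)
  norm_num at h
  rw [h]
  exact gA_eq_altGo pay _ price (PySem.List.sorted_perm price _ _)
    (PySem.List.sorted_pairwise price _)
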